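-- pv_equiv track=rewrite | github.com/Darshil-Solanki/LeetCode | contest/equalScoreSubstrings.py | scoreBalance
-- ===== SOURCE A (Python) =====
-- def scoreBalance(s: str) -> bool:
--     left_prefix, right_prefix = [], []
--     t, n = 0, len(s)
--     for c in s:
--         t += ord(c)-96
--         left_prefix.append(t)
--     t = 0
--     for c in s[::-1]:
--         t += ord(c)-96
--         right_prefix.append(t)
--     right_prefix = right_prefix[::-1]
--
--     for i in range(n-1):
--         left = left_prefix[i]
--         right = right_prefix[i+1]
--         if left == right:
--             return True
--
--     return False
-- ===== SOURCE B (Python) =====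
-- def scoreBalance(s: str) -> bool:
--     total = sum(ord(c) - 96 for c in s)
--     left = 0
--     for c in s[:-1]:
--         left += ord(c) - 96
--         if left == total - left:
--             return True
--     return False
-- ===== Notes on version B (the rewrite author's own statement) =====
-- stated objective: simpler
-- what changed: Replaces the two prefix-sum arrays and the indexed scan by a single total computed once plus one inline-compare pass maintaining only a running left sum.
import Mathlib
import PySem

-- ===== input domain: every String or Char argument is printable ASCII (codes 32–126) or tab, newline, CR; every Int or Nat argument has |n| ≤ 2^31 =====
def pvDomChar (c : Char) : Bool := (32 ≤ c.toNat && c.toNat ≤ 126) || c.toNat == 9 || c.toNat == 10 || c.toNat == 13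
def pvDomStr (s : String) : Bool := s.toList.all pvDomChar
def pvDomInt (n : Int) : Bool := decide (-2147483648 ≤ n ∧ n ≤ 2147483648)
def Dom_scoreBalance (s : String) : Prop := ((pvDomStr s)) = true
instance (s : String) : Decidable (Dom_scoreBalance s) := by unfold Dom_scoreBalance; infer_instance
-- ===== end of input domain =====

-- B replaces A's two prefix-sum arrays and indexed scan by one total plus a single running-sum pass: simpler, O(1) extra space.


-- ===== PORT A =====
def scoreBalance (s : String) : Bool :=
  let cs := s.toList
  let n : Int := cs.length
  let lp := (cs.foldl
    (fun (p : List Int × Int) c =>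
      (p.1 ++ [p.2 + ((c.toNat : Int) - 96)], p.2 + ((c.toNat : Int) - 96))) ([], 0)).1
  let rpRev := (cs.reverse.foldl
    (fun (p : List Int × Int) c =>
      (p.1 ++ [p.2 + ((c.toNat : Int) - 96)], p.2 + ((c.toNat : Int) - 96))) ([], 0)).1
  let rp := rpRev.reverse
  (PySem.List.pyRange 0 (n - 1) 1).any
    (fun i => PySem.List.pyGet? lp i == PySem.List.pyGet? rp (i + 1))

-- ===== PORT B =====
def altLoop (total left : Int) : List Char → Bool
  | [] => false
  | c :: rest =>
    let l := left + ((c.toNat : Int) - 96)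
    if l == total - l then true else altLoop total l rest

def scoreBalance_alt (s : String) : Bool :=
  let cs := s.toList
  let total := cs.foldl (fun t c => t + ((c.toNat : Int) - 96)) 0
  altLoop total 0 cs.dropLast

-- ===== PRECONDITION & SPEC =====
def Spec_scoreBalance (s : String) (out : Bool) : Prop := out = scoreBalance_alt s
instance (s : String) (out : Bool) : Decidable (Spec_scoreBalance s out) := by unfold Spec_scoreBalance; infer_instance

-- ===== CLAIM (what is proved, stated in full; the proofs are below) =====
def Claim_equal_scoreBalance : Prop := ∀ (s : String), Dom_scoreBalance s → Spec_scoreBalance s (scoreBalance s)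

-- ===== LEMMAS AND PROOFS =====

/-- Character value `ord(c) - 96` used by both programs. -/
def pvVal (c : Char) : Int := (c.toNat : Int) - 96

/-- Prefix sums of character values starting from `t` (first element is `t + val c₀`). -/
def pvSums (t : Int) : List Char → List Int
  | [] => []
  | c :: cs => (t + pvVal c) :: pvSums (t + pvVal c) cs

/-- Total character value of a string. -/
def pvTot (cs : List Char) : Int := (cs.map pvVal).sum

@[simp] theorem pvSums_length (t : Int) (cs : List Char) : (pvSums t cs).length = cs.length := by
  induction cs generalizing t with
  | nil => rfl
  | cons c cs ih => simp [pvSums, ih]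

/-- A's prefix-building fold computes `pvSums`. -/
@[simp] theorem pvFoldA (cs : List Char) (acc : List Int) (t : Int) :
    cs.foldl
      (fun (p : List Int × Int) c =>
        (p.1 ++ [p.2 + ((c.toNat : Int) - 96)], p.2 + ((c.toNat : Int) - 96))) (acc, t)
      = (acc ++ pvSums t cs, t + pvTot cs) := by
  induction cs generalizing acc t with
  | nil => simp [pvSums, pvTot]
  | cons c cs ih =>
      simp only [List.foldl_cons, ih, pvSums, pvTot, List.map_cons, List.sum_cons,
        Prod.mk.injEq]
      refine ⟨by simp [pvVal], by simp [pvVal]; ring⟩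

theorem pvSums_shift (cs : List Char) (t : Int) :
    pvSums t cs = (pvSums 0 cs).map (fun x => t + x) := by
  induction cs generalizing t with
  | nil => rfl
  | cons c cs ih =>
      simp only [pvSums, List.map_cons, zero_add]
      rw [ih (t + pvVal c), ih (pvVal c), List.map_map]
      congr 1
      exact List.map_congr_left (fun x _ => by simp [Function.comp]; ring)

theorem pvSums_append (xs ys : List Char) (t : Int) :
    pvSums t (xs ++ ys) = pvSums t xs ++ pvSums (t + pvTot xs) ys := by
  induction xs generalizing t with
  | nil => simp [pvSums, pvTot]
  | cons c xs ih =>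
      simp only [List.cons_append, pvSums, ih, pvTot, List.map_cons, List.sum_cons]
      rw [add_assoc]

/-- The reversed-suffix-sum array, reversed back, is `total - prefix` pointwise. -/
theorem pvRev (cs : List Char) :
    (pvSums 0 cs.reverse).reverse = ((0 :: pvSums 0 cs).dropLast).map (fun l => pvTot cs - l) := by
  induction cs with
  | nil => rfl
  | cons c cs ih =>
      have htot : pvTot cs.reverse = pvTot cs := by simp [pvTot]
      have h1 : (c :: cs).reverse = cs.reverse ++ [c] := by simp
      rw [h1, pvSums_append, htot]
      have h2 : pvSums (0 + pvTot cs) [c] = [0 + pvTot cs + pvVal c] := rfl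
      rw [h2, List.reverse_append, ih]
      have h3 : pvSums 0 (c :: cs) = (0 + pvVal c) :: pvSums (0 + pvVal c) cs := rfl
      rw [h3, List.dropLast_cons₂, List.map_cons, List.reverse_singleton,
        List.singleton_append]
      congr 1
      · simp [pvTot, pvVal]; ring
      · rw [pvSums_shift cs (0 + pvVal c)]
        rw [show ((0 + pvVal c) :: List.map (fun x => 0 + pvVal c + x) (pvSums 0 cs))
              = List.map (fun x => 0 + pvVal c + x) (0 :: pvSums 0 cs) by simp]
        rw [← List.map_dropLast, List.map_map]
        exact (List.map_congr_left (fun x _ => by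
          simp only [Function.comp_apply, pvTot, pvVal, List.map_cons, List.sum_cons]
          ring)).symm

theorem pvSums_dropLast (cs : List Char) (t : Int) :
    pvSums t cs.dropLast = (pvSums t cs).dropLast := by
  induction cs generalizing t with
  | nil => rfl
  | cons c cs ih =>
      cases cs with
      | nil => rfl
      | cons c' cs' => simp only [List.dropLast_cons₂, pvSums, ih]

@[simp] theorem pvFoldTot (cs : List Char) (t : Int) :
    cs.foldl (fun a c => a + ((c.toNat : Int) - 96)) t = t + pvTot cs := by
  induction cs generalizing t with
  | nil => simp [pvTot]
  | cons c cs ih => simp [ih, pvTot, pvVal]; ring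

@[simp] theorem altLoop_eq (total left : Int) (cs : List Char) :
    altLoop total left cs = (pvSums left cs).any (fun l => l == total - l) := by
  induction cs generalizing left with
  | nil => rfl
  | cons c cs ih => simp only [altLoop, pvSums, List.any_cons, pvVal, ih]; split_ifs with h <;> simp [h]

/-- Core index-level equivalence of the two scans. -/
theorem pvKey (L : List Int) (T : Int) (n : Nat) (hL : L.length = n) :
    ((PySem.List.pyRange 0 ((n : Int) - 1) 1).any
      (fun i => PySem.List.pyGet? L i ==
        PySem.List.pyGet? (((0 :: L).dropLast).map (fun l => T - l)) (i + 1)))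
      = (L.dropLast).any (fun l => l == T - l) := by
  subst hL
  rw [Bool.eq_iff_iff]
  simp only [List.any_eq_true]
  constructor
  · rintro ⟨i, hi, hcond⟩
    rw [PySem.List.mem_pyRange_one] at hi
    obtain ⟨h0, h1⟩ := hi
    obtain ⟨k, rfl⟩ : ∃ k : Nat, i = (k : Int) := ⟨i.toNat, (Int.toNat_of_nonneg h0).symm⟩
    have hklt : k + 1 < L.length := by omega
    have e1 : PySem.List.pyGet? L (k : Int) = some (L[k]'(by omega)) := by
      rw [PySem.List.pyGet?_natCast]
      exact List.getElem?_eq_getElem (by omega)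
    have e2 : PySem.List.pyGet? (((0 :: L).dropLast).map (fun l => T - l)) ((k : Int) + 1)
        = some (T - L[k]'(by omega)) := by
      rw [show ((k : Int) + 1) = ((k + 1 : Nat) : Int) by omega,
        PySem.List.pyGet?_natCast,
        List.getElem?_eq_getElem (by simp; omega)]
      congr 1
      rw [List.getElem_map, List.getElem_dropLast, List.getElem_cons_succ]
    rw [e1, e2] at hcond
    have hval : L[k]'(by omega) = T - L[k]'(by omega) := by simpa using hcond
    refine ⟨L.dropLast[k]'(by simp; omega), List.getElem_mem _, ?_⟩
    rw [List.getElem_dropLast]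
    simpa using hval
  · rintro ⟨l, hl, hcond⟩
    obtain ⟨k, hk, hlk⟩ := List.getElem_of_mem hl
    have hkl : k < L.length - 1 := by simpa using hk
    have hLk : L[k]'(by omega) = l := by rw [← hlk, List.getElem_dropLast]
    refine ⟨(k : Int), ?_, ?_⟩
    · rw [PySem.List.mem_pyRange_one]
      constructor <;> omega
    · rw [PySem.List.pyGet?_natCast,
        show ((k : Int) + 1) = ((k + 1 : Nat) : Int) by omega,
        PySem.List.pyGet?_natCast,
        List.getElem?_eq_getElem (by omega),
        List.getElem?_eq_getElem (by simp; omega)]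
      have e3 : (((0 :: L).dropLast).map (fun l => T - l))[k+1]'(by simp; omega)
          = T - L[k]'(by omega) := by
        rw [List.getElem_map, List.getElem_dropLast, List.getElem_cons_succ]
      rw [e3, hLk]
      simpa using hcond

-- ===== VERDICT (by name: the statement is the Claim_ definition above) =====
theorem scoreBalance_spec : Claim_equal_scoreBalance := by
  intro s _
  unfold Spec_scoreBalance scoreBalance scoreBalance_alt
  simp only [pvFoldA, List.nil_append, altLoop_eq, pvFoldTot, zero_add, pvRev,
    pvSums_dropLast]
  exact pvKey _ _ _ (pvSums_length 0 s.toList)
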